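-- pv_equiv track=rewrite | github.com/silune/Connect4 | connect4.py | count_attack
-- ===== SOURCE A (Python) =====
-- def count_attack_list(list, n):
--     """Compte le nombre d'attaques sur une ligne / colone / diagonale (list) et renvoie le nombre d'attaques pour chaques joueurs : (j1, j2)"""
--     attacks = []
--     indexStart = 0
--     indexEnd = 0
--     consecutive = 1
--     for i in range(len(list) - 1):
--         if list[i] == list[i+1]:
--             if consecutive == 1:
--                 indexStart = i
--             consecutive += 1
--         else:
--             if consecutive >= n:
--                 indexEnd = i
--                 if indexStart > 0:
--                     if list[indexStart - 1] == 0: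
--                         if not (indexStart - 1, list[indexStart]) in attacks:
--                             attacks.append((indexStart - 1, list[indexStart]))
--                 if list[indexEnd +1] == 0:
--                     if not (indexEnd + 1, list[indexEnd]) in attacks:
--                         attacks.append((indexEnd + 1, list[indexEnd]))
--             consecutive = 1
--     if consecutive >= n:
--         if indexStart > 0:
--             if list[indexStart - 1] == 0:
--                 if not (indexStart - 1, list[indexStart]) in attacks:
--                     attacks.append((indexStart - 1, list[indexStart]))
--     attacks1 = len([e for e in attacks if e[1] == 1])
--     attacks2 = len(attacks) - attacks1
--     return (attacks1, attacks2)
--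
-- def count_attack(grid, n):
--     """Compte le nombre d'attaque sur la grille de jeu en utilisant "count_attack_list" """
--     res = [0, 0]
--     cmax, lmax = len(grid), len(grid[0])
--     #test des colones
--     for c in grid:
--         resColone = count_attack_list(c, n)
--         res[0] += resColone[0]
--         res[1] += resColone[1]
--     #test des lignes
--     for i in range(len(grid[0])):
--         resLigne = count_attack_list([c[i] for c in grid], n)
--         res[0] += resLigne[0]
--         res[1] += resLigne[1]
--     #test des diagonales /
--     #en partant de la première colone:
--     for l in range(1, lmax):
--         dc, dl = 0, l
--         diag = []
--         while dc < cmax and dl < lmax: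
--             diag.append(grid[dc][dl])
--             dc += 1
--             dl += 1
--         resDiag = count_attack_list(diag, n)
--         res[0] += resDiag[0]
--         res[1] += resDiag[1]
--     #en partant de la première ligne:
--     for c in range(cmax):
--         dc, dl = c, 0
--         diag = []
--         while dc < cmax and dl < lmax:
--             diag.append(grid[dc][dl])
--             dc += 1
--             dl += 1
--         resDiag = count_attack_list(diag, n)
--         res[0] += resDiag[0]
--         res[1] += resDiag[1]
--     #test des diagonales \
--     #en partant de la dernière colone:
--     for l in range(1, lmax):
--         dc, dl = cmax - 1, l
--         diag = []
--         while dc >= 0 and dl < lmax: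
--             diag.append(grid[dc][dl])
--             dc -= 1
--             dl += 1
--         resDiag = count_attack_list(diag, n)
--         res[0] += resDiag[0]
--         res[1] += resDiag[1]
--     #en partant de la première ligne:
--     for c in range(cmax):
--         dc, dl = c, 0
--         diag = []
--         while dc >= 0 and dl < lmax:
--             diag.append(grid[dc][dl])
--             dc -= 1
--             dl += 1
--         resDiag = count_attack_list(diag, n)
--         res[0] += resDiag[0]
--         res[1] += resDiag[1]
--     return res
-- ===== SOURCE B (Python) =====
-- def count_attack_list(list, n):
--     """Compte le nombre d'attaques sur une ligne / colone / diagonale (list) et renvoie le nombre d'attaques pour chaques joueurs : (j1, j2)"""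
--     attacks = []
--     indexStart = 0
--     indexEnd = 0
--     consecutive = 1
--     for i in range(len(list) - 1):
--         if list[i] == list[i+1]:
--             if consecutive == 1:
--                 indexStart = i
--             consecutive += 1
--         else:
--             if consecutive >= n:
--                 indexEnd = i
--                 if indexStart > 0:
--                     if list[indexStart - 1] == 0:
--                         if not (indexStart - 1, list[indexStart]) in attacks:
--                             attacks.append((indexStart - 1, list[indexStart]))
--                 if list[indexEnd +1] == 0:
--                     if not (indexEnd + 1, list[indexEnd]) in attacks:
--                         attacks.append((indexEnd + 1, list[indexEnd]))
--             consecutive = 1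
--     if consecutive >= n:
--         if indexStart > 0:
--             if list[indexStart - 1] == 0:
--                 if not (indexStart - 1, list[indexStart]) in attacks:
--                     attacks.append((indexStart - 1, list[indexStart]))
--     attacks1 = len([e for e in attacks if e[1] == 1])
--     attacks2 = len(attacks) - attacks1
--     return (attacks1, attacks2)
--
-- def count_attack(grid, n):
--     """One pass over the cells bucketing each cell into its row, /-diagonal and
--     \\-diagonal; columns are the grid's own rows.  Sums count_attack_list over
--     every bucket (\\-buckets reversed to restore the scan order)."""
--     cmax, lmax = len(grid), len(grid[0])
--     rows = [[] for _ in range(lmax)]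
--     diags = [[] for _ in range(cmax + lmax - 1)]   # key dl - dc + cmax - 1
--     adiags = [[] for _ in range(cmax + lmax - 1)]  # key dc + dl
--     for dc in range(cmax):
--         row = grid[dc]
--         for dl in range(lmax):
--             v = row[dl]
--             rows[dl].append(v)
--             diags[dl - dc + cmax - 1].append(v)
--             adiags[dc + dl].append(v)
--     a1 = 0
--     a2 = 0
--     for line in grid:
--         r = count_attack_list(line, n)
--         a1 += r[0]; a2 += r[1]
--     for line in rows:
--         r = count_attack_list(line, n)
--         a1 += r[0]; a2 += r[1]
--     for line in diags:
--         r = count_attack_list(line, n)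
--         a1 += r[0]; a2 += r[1]
--     for line in adiags:
--         r = count_attack_list(list(reversed(line)), n)
--         a1 += r[0]; a2 += r[1]
--     return [a1, a2]
-- ===== Notes on version B (the rewrite author's own statement) =====
-- stated objective: alternative
-- what changed: Instead of A's six separate line-walking loops (columns, rows, two starting-edge loops per diagonal direction with inner while-walks), B makes one pass over all cells, bucketing each cell by row index, dl-dc (/-diagonals) and dc+dl (\-diagonals), then sums count_attack_list over the buckets (\-buckets reversed); count_attack_list is kept byte-for-byte.
import Mathlib
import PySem

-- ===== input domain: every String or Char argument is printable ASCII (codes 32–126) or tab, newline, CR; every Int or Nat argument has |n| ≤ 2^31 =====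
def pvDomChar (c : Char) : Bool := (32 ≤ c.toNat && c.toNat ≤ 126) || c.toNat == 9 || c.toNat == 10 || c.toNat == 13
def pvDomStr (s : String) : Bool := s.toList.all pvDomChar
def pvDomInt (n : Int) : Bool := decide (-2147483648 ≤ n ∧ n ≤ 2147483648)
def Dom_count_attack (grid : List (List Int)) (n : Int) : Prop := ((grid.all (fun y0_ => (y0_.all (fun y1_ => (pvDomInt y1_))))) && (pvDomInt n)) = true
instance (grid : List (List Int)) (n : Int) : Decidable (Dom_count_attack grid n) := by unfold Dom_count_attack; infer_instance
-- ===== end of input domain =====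

-- B re-decomposes count_attack as one bucketing pass over the cells (rows / both diagonal
-- families collected by key) instead of A's six separate line-walking loops; same cost,
-- objective: alternative.  count_attack_list is kept byte-for-byte and shared.

-- ===== PORT A =====
-- shared helper: literal port of count_attack_list (loop state: attacks, indexStart, indexEnd, consecutive)
def countAttackList (l : List Int) (n : Int) : Int × Int :=
  let st := (List.range (l.length - 1)).foldl
    (fun (st : List (Nat × Int) × Nat × Nat × Int) i =>
      let (attacks, iS, iE, consec) := st
      if l.getD i 0 == l.getD (i+1) 0 then
        (attacks, (if consec == 1 then i else iS), iE, consec + 1)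
      else
        if consec ≥ n then
          let iE := i
          let attacks :=
            if iS > 0 then
              if l.getD (iS - 1) 0 == 0 then
                if (iS - 1, l.getD iS 0) ∈ attacks then attacks
                else attacks ++ [(iS - 1, l.getD iS 0)]
              else attacks
            else attacks
          let attacks :=
            if l.getD (iE + 1) 0 == 0 then
              if (iE + 1, l.getD iE 0) ∈ attacks then attacks
              else attacks ++ [(iE + 1, l.getD iE 0)]
            else attacks
          (attacks, iS, iE, (1 : Int))
        else (attacks, iS, iE, (1 : Int)))
    ([], 0, 0, 1)
  let attacks :=
    if st.2.2.2 ≥ n then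
      if st.2.1 > 0 then
        if l.getD (st.2.1 - 1) 0 == 0 then
          if (st.2.1 - 1, l.getD st.2.1 0) ∈ st.1 then st.1
          else st.1 ++ [(st.2.1 - 1, l.getD st.2.1 0)]
        else st.1
      else st.1
    else st.1
  let a1 : Int := ((attacks.filter (fun e => e.2 == 1)).length : Int)
  (a1, (attacks.length : Int) - a1)

-- res[0] += r[0]; res[1] += r[1]
def padd (a b : Int × Int) : Int × Int := (a.1 + b.1, a.2 + b.2)

-- the `while dc < cmax and dl < lmax: diag.append(grid[dc][dl]); dc += 1; dl += 1` walk;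
-- `left` counts the iterations the condition `dc < cmax` still allows (= cmax - dc), so the
-- recursion is structural and the two guards are exactly Python's loop condition
def walkIncF (grid : List (List Int)) (lmax : Nat) : Nat → Nat → Nat → List Int
  | 0, _, _ => []
  | left + 1, dc, dl =>
    if dl < lmax then ((grid.getD dc []).getD dl 0) :: walkIncF grid lmax left (dc+1) (dl+1)
    else []

def walkInc (grid : List (List Int)) (cmax lmax : Nat) (dc dl : Nat) : List Int :=
  walkIncF grid lmax (cmax - dc) dc dl

-- the `while dc >= 0 and dl < lmax: diag.append(grid[dc][dl]); dc -= 1; dl += 1` walk;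
-- first argument is dc+1 (so 0 means dc < 0): the guards are exactly Python's loop condition
def walkDecF (grid : List (List Int)) (lmax : Nat) : Nat → Nat → List Int
  | 0, _ => []
  | dc + 1, dl =>
    if dl < lmax then ((grid.getD dc []).getD dl 0) :: walkDecF grid lmax dc (dl+1)
    else []

def walkDec (grid : List (List Int)) (lmax : Nat) (dc : Int) (dl : Nat) : List Int :=
  walkDecF grid lmax (dc + 1).toNat dl

def count_attack (grid : List (List Int)) (n : Int) : List Int :=
  let cmax := grid.length
  let lmax := (grid.headD []).length
  let res : Int × Int := (0, 0)
  -- test des colones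
  let res := grid.foldl (fun r c => padd r (countAttackList c n)) res
  -- test des lignes
  let res := (List.range lmax).foldl
    (fun r i => padd r (countAttackList (grid.map (fun c => c.getD i 0)) n)) res
  -- diagonales /  (première colone puis première ligne)
  let res := (List.range' 1 (lmax - 1)).foldl
    (fun r l => padd r (countAttackList (walkInc grid cmax lmax 0 l) n)) res
  let res := (List.range cmax).foldl
    (fun r c => padd r (countAttackList (walkInc grid cmax lmax c 0) n)) res
  -- diagonales \  (dernière colone puis première ligne)
  let res := (List.range' 1 (lmax - 1)).foldl
    (fun r l => padd r (countAttackList (walkDec grid lmax ((cmax : Int) - 1) l) n)) res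
  let res := (List.range cmax).foldl
    (fun r (c : Nat) => padd r (countAttackList (walkDec grid lmax (c : Int) 0) n)) res
  [res.1, res.2]

-- ===== PORT B =====
-- buckets[k].append(v)
def appendAt (bs : List (List Int)) (k : Nat) (v : Int) : List (List Int) :=
  bs.modify k (fun l => l ++ [v])

def count_attack_alt (grid : List (List Int)) (n : Int) : List Int :=
  let cmax := grid.length
  let lmax := (grid.headD []).length
  let rows0 : List (List Int) := List.replicate lmax []
  let diags0 : List (List Int) := List.replicate (cmax + lmax - 1) []
  let adiags0 : List (List Int) := List.replicate (cmax + lmax - 1) []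
  -- one pass over the cells, bucketing into rows / the two diagonal families
  let st := (List.range cmax).foldl
    (fun (st : List (List Int) × List (List Int) × List (List Int)) dc =>
      let row := grid.getD dc []
      (List.range lmax).foldl
        (fun st dl =>
          let v := row.getD dl 0
          (appendAt st.1 dl v,
           -- dl - dc + cmax - 1 is ≥ 0 here (dc ≤ cmax-1), so toNat is Python's int value
           appendAt st.2.1 (((dl : Int) - (dc : Int) + (cmax : Int) - 1).toNat) v,
           appendAt st.2.2 (dc + dl) v))
        st)
    (rows0, diags0, adiags0)
  let a := grid.foldl (fun r c => padd r (countAttackList c n)) ((0, 0) : Int × Int)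
  let a := st.1.foldl (fun r l => padd r (countAttackList l n)) a
  let a := st.2.1.foldl (fun r l => padd r (countAttackList l n)) a
  let a := st.2.2.foldl (fun r l => padd r (countAttackList l.reverse n)) a
  [a.1, a.2]

-- ===== PRECONDITION & SPEC =====
-- Pre_ excludes exactly the inputs where Python A raises IndexError: the empty grid
-- (len(grid[0])), and grids with a row shorter than row 0 (grid[dc][dl] / c[i]).
def Pre_count_attack (grid : List (List Int)) (n : Int) : Prop :=
  grid ≠ [] ∧ ∀ row ∈ grid, (grid.headD []).length ≤ row.length
instance (grid : List (List Int)) (n : Int) : Decidable (Pre_count_attack grid n) := by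
  unfold Pre_count_attack; infer_instance

def pvWitness_count_attack : List (List Int) × Int := ([[0, 1, 1, 0], [1, 1, 2, 2], [0, 2, 0, 1]], 2)

def Spec_count_attack (grid : List (List Int)) (n : Int) (out : List Int) : Prop := out = count_attack_alt grid n
instance (grid : List (List Int)) (n : Int) (out : List Int) : Decidable (Spec_count_attack grid n out) := by unfold Spec_count_attack; infer_instance

-- ===== CLAIM (what is proved, stated in full; the proofs are below) =====
def Claim_equal_count_attack : Prop := ∀ (grid : List (List Int)) (n : Int), Dom_count_attack grid n → Pre_count_attack grid n → Spec_count_attack grid n (count_attack grid n)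

-- ===== LEMMAS AND PROOFS =====

-- one cell of the grid, as both ports read it
def gcell (grid : List (List Int)) (dc dl : Nat) : Int := (grid.getD dc []).getD dl 0

-- sum of a list of (Int × Int) pairs under padd
def psum (xs : List (Int × Int)) : Int × Int := xs.foldr padd (0, 0)

theorem padd_lcomm : ∀ (a b c : Int × Int), padd a (padd b c) = padd b (padd a c) := by
  intro a b c; simp [padd, Prod.ext_iff]; omega

theorem psum_perm {xs ys : List (Int × Int)} (h : xs.Perm ys) : psum xs = psum ys := by
  unfold psum
  exact List.Perm.foldr_eq (lcomm := ⟨padd_lcomm⟩) h _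

theorem psum_append (xs ys : List (Int × Int)) : psum (xs ++ ys) = padd (psum xs) (psum ys) := by
  induction xs with
  | nil => simp [psum, padd]
  | cons a xs ih => simp only [List.cons_append, psum, List.foldr_cons] at ih ⊢
                    rw [ih]; simp [psum, padd, Prod.ext_iff]; omega

theorem foldl_padd {α : Type} (F : α → Int × Int) (L : List α) (r : Int × Int) :
    L.foldl (fun r x => padd r (F x)) r = padd r (psum (L.map F)) := by
  induction L generalizing r with
  | nil => simp [psum, padd]
  | cons a L ih => rw [List.foldl_cons, ih]; simp [psum, padd, Prod.ext_iff]; omega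

-- countAttackList on the empty line is (0,0) whatever n is
theorem countAttackList_nil (n : Int) : countAttackList [] n = (0, 0) := by
  simp [countAttackList]

-- splitting a fold whose step updates the three components independently
theorem foldl_prod3 {α A B C : Type} (L : List α) (f : A → α → A) (g : B → α → B)
    (h : C → α → C) (p : A × B × C) :
    L.foldl (fun st x => (f st.1 x, g st.2.1 x, h st.2.2 x)) p =
      (L.foldl f p.1, L.foldl g p.2.1, L.foldl h p.2.2) := by
  induction L generalizing p with
  | nil => rfl
  | cons a L ih => simp [List.foldl_cons, ih]

theorem appendAt_length (bs : List (List Int)) (k : Nat) (v : Int) :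
    (appendAt bs k v).length = bs.length := by
  simp [appendAt]

theorem appendAt_getD (bs : List (List Int)) (j k : Nat) (v : Int) (hk : k < bs.length) :
    (appendAt bs j v).getD k [] = if j = k then bs.getD k [] ++ [v] else bs.getD k [] := by
  have h : bs[k]? = some bs[k] := List.getElem?_eq_getElem hk
  simp [appendAt, List.getD, List.getElem?_modify, h]

theorem foldl_appendAt_length {α : Type} (L : List α) (κ : α → Nat) (V : α → Int)
    (bs : List (List Int)) :
    (L.foldl (fun bs x => appendAt bs (κ x) (V x)) bs).length = bs.length := by
  induction L generalizing bs with
  | nil => rfl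
  | cons a L ih => simp [List.foldl_cons, ih, appendAt_length]

theorem foldl_appendAt_getD {α : Type} (L : List α) (κ : α → Nat) (V : α → Int)
    (bs : List (List Int)) (k : Nat) (hk : k < bs.length) :
    (L.foldl (fun bs x => appendAt bs (κ x) (V x)) bs).getD k [] =
      bs.getD k [] ++ (L.filter (fun x => κ x == k)).map V := by
  induction L generalizing bs with
  | nil => simp
  | cons a L ih =>
    rw [List.foldl_cons, ih _ (by rw [appendAt_length]; exact hk), List.filter_cons,
      appendAt_getD _ _ _ _ hk]
    by_cases h : κ a = k
    · have hbeq : (κ a == k) = true := by simpa using h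
      rw [if_pos h, hbeq]
      simp [List.append_assoc]
    · have hbeq : (κ a == k) = false := by simpa using h
      rw [if_neg h, hbeq]
      simp

theorem foldl2_appendAt_length (L1 L2 : List Nat) (κ : Nat → Nat → Nat) (V : Nat → Nat → Int)
    (bs : List (List Int)) :
    (L1.foldl (fun bs dc => L2.foldl (fun bs dl => appendAt bs (κ dc dl) (V dc dl)) bs) bs).length
      = bs.length := by
  induction L1 generalizing bs with
  | nil => rfl
  | cons a L ih => simp [List.foldl_cons, ih, foldl_appendAt_length]

theorem foldl2_appendAt_getD (L1 L2 : List Nat) (κ : Nat → Nat → Nat) (V : Nat → Nat → Int)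
    (bs : List (List Int)) (k : Nat) (hk : k < bs.length) :
    (L1.foldl (fun bs dc => L2.foldl (fun bs dl => appendAt bs (κ dc dl) (V dc dl)) bs) bs).getD k []
      = bs.getD k [] ++ L1.flatMap (fun dc => ((L2.filter (fun dl => κ dc dl == k)).map (V dc))) := by
  induction L1 generalizing bs with
  | nil => simp
  | cons a L ih =>
    rw [List.foldl_cons, ih _ (by rw [foldl_appendAt_length]; exact hk),
      foldl_appendAt_getD _ _ _ _ _ hk, List.flatMap_cons, List.append_assoc]

-- getD inside the range, as an equality of whole lists
theorem list_eq_of_getD {l1 l2 : List (List Int)} (hlen : l1.length = l2.length)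
    (h : ∀ k, k < l1.length → l1.getD k [] = l2.getD k []) : l1 = l2 := by
  apply List.ext_getElem hlen
  intro k h1 h2
  have := h k h1
  rwa [List.getD_eq_getElem _ _ h1, List.getD_eq_getElem _ _ h2] at this

theorem getD_replicate_nil (m k : Nat) : (List.replicate m ([] : List Int)).getD k [] = [] := by
  simp [List.getD, List.getElem?_replicate]
  split <;> rfl

-- the two filter shapes that occur (one dl per diagonal/row and cell)
theorem filter_range_eq (m k : Nat) :
    (List.range m).filter (fun dl => dl == k) = if k < m then [k] else [] := by
  induction m with
  | zero => simp
  | succ m ih =>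
    rw [List.range_succ, List.filter_append, ih]
    by_cases hmk : m = k
    · subst hmk; simp [Nat.lt_irrefl, Nat.lt_succ_self]
    · have h1 : (k < m) = (k < m + 1) := by
        simp only [eq_iff_iff]; omega
      simp [hmk, h1]

theorem filter_range_add_eq (m a k : Nat) :
    (List.range m).filter (fun dl => dl + a == k) =
      if a ≤ k ∧ k - a < m then [k - a] else [] := by
  induction m with
  | zero => simp
  | succ m ih =>
    rw [List.range_succ, List.filter_append, ih]
    by_cases hmk : m + a = k
    · have h2 : a ≤ k ∧ k - a < m + 1 := by omega
      have h3 : ¬(a ≤ k ∧ k - a < m) := by omega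
      have h4 : k - a = m := by omega
      simp [hmk, h2, h3, h4]
    · have h1 : (a ≤ k ∧ k - a < m) = (a ≤ k ∧ k - a < m + 1) := by
        simp only [eq_iff_iff]; omega
      simp [hmk, h1]

-- collapsing a flatMap of interval-guarded singletons to a map over range'
theorem flatMap_if_interval (m lo hi : Nat) (f : Nat → Int) :
    ((List.range m).flatMap (fun dc => if lo ≤ dc ∧ dc < hi then [f dc] else [])) =
      (List.range' lo (min m hi - lo)).map f := by
  induction m with
  | zero => simp
  | succ m ih =>
    rw [List.range_succ, List.flatMap_append, ih]
    by_cases h : lo ≤ m ∧ m < hi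
    · have h1 : min (m + 1) hi - lo = (min m hi - lo) + 1 := by omega
      have h2 : lo + 1 * (min m hi - lo) = m := by omega
      rw [h1, List.range'_concat, List.map_append, h2]
      simp [h]
    · have h1 : min (m + 1) hi - lo = min m hi - lo := by omega
      simp [h, h1]

-- the walks as closed maps over a range
theorem walkIncF_eq (grid : List (List Int)) (lmax : Nat) :
    ∀ left dc dl, walkIncF grid lmax left dc dl =
      (List.range (min left (lmax - dl))).map (fun i => gcell grid (dc + i) (dl + i)) := by
  intro left
  induction left with
  | zero => intro dc dl; simp [walkIncF]
  | succ left ih =>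
    intro dc dl
    by_cases h : dl < lmax
    · have hmin : min (left + 1) (lmax - dl) = min left (lmax - (dl + 1)) + 1 := by
        simp only [Nat.min_def]; split_ifs <;> omega
      rw [walkIncF, if_pos h, ih, hmin, List.range_succ_eq_map, List.map_cons, List.map_map]
      refine congrArg₂ _ rfl (List.map_congr_left fun i _ => ?_)
      have e1 : dc + 1 + i = dc + (i + 1) := by omega
      have e2 : dl + 1 + i = dl + (i + 1) := by omega
      simp only [Function.comp, Nat.succ_eq_add_one, e1, e2]
    · have hmin : min (left + 1) (lmax - dl) = 0 := by
        simp only [Nat.min_def]; split_ifs <;> omega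
      rw [walkIncF, if_neg h, hmin]
      simp

theorem walkDecF_eq (grid : List (List Int)) (lmax : Nat) :
    ∀ dcp dl, walkDecF grid lmax dcp dl =
      (List.range (min dcp (lmax - dl))).map (fun i => gcell grid (dcp - 1 - i) (dl + i)) := by
  intro dcp
  induction dcp with
  | zero => intro dl; simp [walkDecF]
  | succ dcp ih =>
    intro dl
    by_cases h : dl < lmax
    · have hmin : min (dcp + 1) (lmax - dl) = min dcp (lmax - (dl + 1)) + 1 := by
        simp only [Nat.min_def]; split_ifs <;> omega
      rw [walkDecF, if_pos h, ih, hmin, List.range_succ_eq_map, List.map_cons, List.map_map]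
      refine congrArg₂ _ (by simp [gcell, List.getD]) (List.map_congr_left fun i _ => ?_)
      have e1 : dcp - 1 - i = dcp + 1 - 1 - (i + 1) := by omega
      have e2 : dl + 1 + i = dl + (i + 1) := by omega
      simp only [Function.comp, Nat.succ_eq_add_one, e1, e2]
    · have hmin : min (dcp + 1) (lmax - dl) = 0 := by
        simp only [Nat.min_def]; split_ifs <;> omega
      rw [walkDecF, if_neg h, hmin]
      simp

-- a map over a list is the map over its index range
theorem map_eq_map_range {β : Type} (grid : List (List Int)) (f : List Int → β) :
    grid.map f = (List.range grid.length).map (fun dc => f (grid.getD dc [])) := by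
  induction grid with
  | nil => simp
  | cons a l ih =>
    rw [List.map_cons, List.length_cons, List.range_succ_eq_map, List.map_cons, List.map_map, ih]
    simp [Function.comp, List.getD]

theorem flatMap_singleton_map {α β : Type} (l : List α) (f : α → β) :
    l.flatMap (fun x => [f x]) = l.map f := by
  induction l with
  | nil => rfl
  | cons a l ih => rw [List.flatMap_cons, ih]; rfl

theorem map_range_getD (F : Nat → List Int) (m k : Nat) (hk : k < m) :
    ((List.range m).map F).getD k [] = F k := by
  rw [List.getD_eq_getElem _ _ (by simpa using hk)]
  simp

theorem flatMap_congr_mem {α β : Type} (l : List α) {f g : α → List β}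
    (h : ∀ a ∈ l, f a = g a) : l.flatMap f = l.flatMap g := by
  induction l with
  | nil => rfl
  | cons a l ih =>
    rw [List.flatMap_cons, List.flatMap_cons, h a (by simp), ih fun x hx => h x (by simp [hx])]

-- the rows buckets after the pass are exactly A's column-comprehension lines
theorem rows_fold_eq (grid : List (List Int)) (lmax : Nat) :
    (List.range grid.length).foldl
      (fun bs dc => (List.range lmax).foldl
        (fun bs dl => appendAt bs dl ((grid.getD dc []).getD dl 0)) bs)
      (List.replicate lmax []) =
    (List.range lmax).map (fun k => grid.map (fun c => c.getD k 0)) := by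
  have hlen : ((List.range grid.length).foldl
      (fun bs dc => (List.range lmax).foldl
        (fun bs dl => appendAt bs dl ((grid.getD dc []).getD dl 0)) bs)
      (List.replicate lmax [])).length = lmax := by
    rw [foldl2_appendAt_length (List.range grid.length) (List.range lmax)
      (fun _ dl => dl) (fun dc dl => (grid.getD dc []).getD dl 0)]
    simp
  apply list_eq_of_getD (by rw [hlen]; simp)
  intro k hk
  rw [hlen] at hk
  rw [foldl2_appendAt_getD (List.range grid.length) (List.range lmax)
      (fun _ dl => dl) (fun dc dl => (grid.getD dc []).getD dl 0) _ k (by simpa using hk),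
    getD_replicate_nil, List.nil_append, map_range_getD _ _ _ hk]
  have h1 : ∀ dc, ((List.range lmax).filter (fun dl => dl == k)).map
      (fun dl => (grid.getD dc []).getD dl 0) = [(grid.getD dc []).getD k 0] := by
    intro dc
    rw [filter_range_eq, if_pos hk]
    simp
  rw [flatMap_congr_mem _ (fun dc _ => h1 dc),
    flatMap_singleton_map (List.range grid.length) (fun dc => (grid.getD dc []).getD k 0),
    map_eq_map_range grid (fun c => c.getD k 0)]

-- the /-diagonal buckets are exactly the walks A extracts (key = dl - dc + cmax - 1)
theorem diags_fold_eq (grid : List (List Int)) (cmax lmax k : Nat) (hk : k < cmax + lmax - 1) :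
    ((List.range cmax).foldl
      (fun bs (dc : Nat) => (List.range lmax).foldl
        (fun bs (dl : Nat) => appendAt bs (((dl : Int) - (dc : Int) + (cmax : Int) - 1).toNat)
          ((grid.getD dc []).getD dl 0)) bs)
      (List.replicate (cmax + lmax - 1) [])).getD k [] =
    walkInc grid cmax lmax (cmax - 1 - k) (k + 1 - cmax) := by
  rw [foldl2_appendAt_getD (List.range cmax) (List.range lmax)
      (fun dc dl => (((dl : Int) - (dc : Int) + (cmax : Int) - 1).toNat))
      (fun dc dl => (grid.getD dc []).getD dl 0) _ k (by simpa using hk),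
    getD_replicate_nil, List.nil_append]
  have h1 : ∀ dc ∈ List.range cmax,
      ((List.range lmax).filter (fun (dl : Nat) => (((dl : Int) - (dc : Int) + (cmax : Int) - 1).toNat == k))).map
        (fun dl => (grid.getD dc []).getD dl 0) =
      (if cmax - 1 - k ≤ dc ∧ dc < cmax + lmax - 1 - k
        then [gcell grid dc (k - (cmax - 1 - dc))] else []) := by
    intro dc hdc
    simp only [List.mem_range] at hdc
    have e : (fun (dl : Nat) => (((dl : Int) - (dc : Int) + (cmax : Int) - 1).toNat == k)) =
        (fun dl => (dl + (cmax - 1 - dc) == k)) := by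
      funext dl
      have : ((dl : Int) - (dc : Int) + (cmax : Int) - 1).toNat = dl + (cmax - 1 - dc) := by omega
      rw [this]
    rw [e, filter_range_add_eq]
    rw [apply_ite (List.map (fun dl => (grid.getD dc []).getD dl 0))]
    refine if_congr (by constructor <;> (intro h; constructor <;> omega)) ?_ rfl
    simp [gcell]
  rw [flatMap_congr_mem _ h1,
    flatMap_if_interval cmax (cmax - 1 - k) (cmax + lmax - 1 - k)
      (fun dc => gcell grid dc (k - (cmax - 1 - dc))),
    List.range'_eq_map_range, List.map_map]
  unfold walkInc
  rw [walkIncF_eq]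
  have hL : min cmax (cmax + lmax - 1 - k) - (cmax - 1 - k) =
      min (cmax - (cmax - 1 - k)) (lmax - (k + 1 - cmax)) := by
    simp only [Nat.min_def]; split_ifs <;> omega
  rw [hL]
  refine List.map_congr_left fun i hi => ?_
  simp only [List.mem_range, Nat.min_def] at hi
  simp only [Function.comp]
  congr 1
  split_ifs at hi <;> omega

-- the \-diagonal buckets, reversed, are exactly the walks A extracts (key = dc + dl)
theorem adiags_fold_eq (grid : List (List Int)) (cmax lmax k : Nat) (hk : k < cmax + lmax - 1) :
    ((List.range cmax).foldl
      (fun bs dc => (List.range lmax).foldl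
        (fun bs dl => appendAt bs (dc + dl) ((grid.getD dc []).getD dl 0)) bs)
      (List.replicate (cmax + lmax - 1) [])).getD k [] =
    (walkDecF grid lmax (min cmax (k + 1)) (k + 1 - cmax)).reverse := by
  rw [foldl2_appendAt_getD (List.range cmax) (List.range lmax)
      (fun dc dl => dc + dl)
      (fun dc dl => (grid.getD dc []).getD dl 0) _ k (by simpa using hk),
    getD_replicate_nil, List.nil_append]
  have h1 : ∀ dc ∈ List.range cmax,
      ((List.range lmax).filter (fun dl => (dc + dl == k))).map
        (fun dl => (grid.getD dc []).getD dl 0) =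
      (if k + 1 - lmax ≤ dc ∧ dc < k + 1
        then [gcell grid dc (k - dc)] else []) := by
    intro dc hdc
    simp only [List.mem_range] at hdc
    have e : (fun dl => (dc + dl == k)) = (fun dl => (dl + dc == k)) := by
      funext dl; rw [Nat.add_comm]
    rw [e, filter_range_add_eq]
    rw [apply_ite (List.map (fun dl => (grid.getD dc []).getD dl 0))]
    refine if_congr (by constructor <;> (intro h; constructor <;> omega)) ?_ rfl
    simp [gcell]
  rw [flatMap_congr_mem _ h1,
    flatMap_if_interval cmax (k + 1 - lmax) (k + 1) (fun dc => gcell grid dc (k - dc))]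
  rw [← List.reverse_eq_iff, ← List.map_reverse, List.reverse_range', List.map_map, walkDecF_eq]
  have hL : min cmax (k + 1) - (k + 1 - lmax) = min (min cmax (k + 1)) (lmax - (k + 1 - cmax)) := by
    simp only [Nat.min_def]; split_ifs <;> omega
  rw [← hL]
  refine List.map_congr_left fun i hi => ?_
  simp only [List.mem_range] at hi
  simp only [Function.comp]
  have e1 : k + 1 - lmax + (min cmax (k + 1) - (k + 1 - lmax)) - 1 - i = min cmax (k + 1) - 1 - i := by
    simp only [Nat.min_def] at hi ⊢; split_ifs at hi ⊢ <;> omega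
  rw [e1]
  have e2 : k - (min cmax (k + 1) - 1 - i) = k + 1 - cmax + i := by
    simp only [Nat.min_def] at hi ⊢; split_ifs at hi ⊢ <;> omega
  rw [e2]

theorem padd_comm (a b : Int × Int) : padd a b = padd b a := by
  simp [padd, Prod.ext_iff]; omega

theorem psum_const_zero {α : Type} (L : List α) (F : α → Int × Int)
    (h : ∀ x ∈ L, F x = (0, 0)) : psum (L.map F) = (0, 0) := by
  induction L with
  | nil => rfl
  | cons a L ih =>
    rw [List.map_cons]
    show padd (F a) (psum (L.map F)) = (0, 0)
    rw [h a (by simp), ih fun x hx => h x (by simp [hx])]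
    rfl

-- the list of buckets, whole
theorem diags_fold_list_eq (grid : List (List Int)) (cmax lmax : Nat) :
    ((List.range cmax).foldl
      (fun bs (dc : Nat) => (List.range lmax).foldl
        (fun bs (dl : Nat) => appendAt bs (((dl : Int) - (dc : Int) + (cmax : Int) - 1).toNat)
          ((grid.getD dc []).getD dl 0)) bs)
      (List.replicate (cmax + lmax - 1) [])) =
    (List.range (cmax + lmax - 1)).map (fun k => walkInc grid cmax lmax (cmax - 1 - k) (k + 1 - cmax)) := by
  have hlen := foldl2_appendAt_length (List.range cmax) (List.range lmax)
      (fun dc dl => (((dl : Int) - (dc : Int) + (cmax : Int) - 1).toNat))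
      (fun dc dl => (grid.getD dc []).getD dl 0) (List.replicate (cmax + lmax - 1) [])
  apply list_eq_of_getD (by rw [hlen]; simp)
  intro k hk
  rw [hlen, List.length_replicate] at hk
  rw [diags_fold_eq grid cmax lmax k hk, map_range_getD _ _ _ hk]

theorem adiags_fold_list_eq (grid : List (List Int)) (cmax lmax : Nat) :
    ((List.range cmax).foldl
      (fun bs (dc : Nat) => (List.range lmax).foldl
        (fun bs (dl : Nat) => appendAt bs (dc + dl) ((grid.getD dc []).getD dl 0)) bs)
      (List.replicate (cmax + lmax - 1) [])) =
    (List.range (cmax + lmax - 1)).map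
      (fun k => (walkDecF grid lmax (min cmax (k + 1)) (k + 1 - cmax)).reverse) := by
  have hlen := foldl2_appendAt_length (List.range cmax) (List.range lmax)
      (fun dc dl => dc + dl)
      (fun dc dl => (grid.getD dc []).getD dl 0) (List.replicate (cmax + lmax - 1) [])
  apply list_eq_of_getD (by rw [hlen]; simp)
  intro k hk
  rw [hlen, List.length_replicate] at hk
  rw [adiags_fold_eq grid cmax lmax k hk, map_range_getD _ _ _ hk]

-- summing G over all keys 0..cmax+lmax-2 = A's key order for the / family
theorem keys_split (cmax lmax : Nat) (hc : 1 ≤ cmax) (hl : 1 ≤ lmax) (G : Nat → Int × Int) :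
    psum ((List.range (cmax + lmax - 1)).map G) =
      padd (psum ((List.range' 1 (lmax - 1)).map (fun l => G (l + (cmax - 1)))))
        (psum ((List.range cmax).map (fun c => G (cmax - 1 - c)))) := by
  have h : cmax + lmax - 1 = cmax + (lmax - 1) := by omega
  rw [h, List.range_add, List.map_append, psum_append]
  have h2 : (List.range cmax).map (fun c => G (cmax - 1 - c)) = ((List.range cmax).map G).reverse := by
    rw [← List.map_reverse]
    have hrev : (List.range cmax).reverse = (List.range cmax).map (fun c => cmax - 1 - c) := by
      rw [List.range_eq_range', List.reverse_range']
      rw [← List.range_eq_range']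
      exact List.map_congr_left fun i _ => by omega
    rw [hrev, List.map_map]
    exact List.map_congr_left fun i _ => by simp [Function.comp]
  have h3 : ((List.range (lmax - 1)).map (fun x => cmax + x)).map G =
      (List.range' 1 (lmax - 1)).map (fun l => G (l + (cmax - 1))) := by
    rw [List.map_map, List.range'_eq_map_range, List.map_map]
    exact List.map_congr_left fun i _ => by simp [Function.comp]; congr 1; omega
  rw [h2, h3, psum_perm (List.reverse_perm ((List.range cmax).map G))]
  exact padd_comm _ _

-- same, A's key order for the \ family
theorem keys_split2 (cmax lmax : Nat) (hc : 1 ≤ cmax) (hl : 1 ≤ lmax) (G : Nat → Int × Int) :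
    psum ((List.range (cmax + lmax - 1)).map G) =
      padd (psum ((List.range' 1 (lmax - 1)).map (fun l => G (l + (cmax - 1)))))
        (psum ((List.range cmax).map G)) := by
  have h : cmax + lmax - 1 = cmax + (lmax - 1) := by omega
  rw [h, List.range_add, List.map_append, psum_append]
  have h3 : ((List.range (lmax - 1)).map (fun x => cmax + x)).map G =
      (List.range' 1 (lmax - 1)).map (fun l => G (l + (cmax - 1))) := by
    rw [List.map_map, List.range'_eq_map_range, List.map_map]
    exact List.map_congr_left fun i _ => by simp [Function.comp]; congr 1; omega
  rw [h3]
  exact padd_comm _ _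

-- the one combined pass splits into three independent bucket passes
theorem st_split (grid : List (List Int)) (cmax lmax : Nat) (L : List Nat) :
    ∀ (i1 i2 i3 : List (List Int)),
    L.foldl
      (fun (st : List (List Int) × List (List Int) × List (List Int)) (dc : Nat) =>
        (List.range lmax).foldl
          (fun st (dl : Nat) =>
            (appendAt st.1 dl ((grid.getD dc []).getD dl 0),
             appendAt st.2.1 (((dl : Int) - (dc : Int) + (cmax : Int) - 1).toNat)
               ((grid.getD dc []).getD dl 0),
             appendAt st.2.2 (dc + dl) ((grid.getD dc []).getD dl 0)))
          st)
      (i1, i2, i3) =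
    (L.foldl (fun bs (dc : Nat) => (List.range lmax).foldl
        (fun bs (dl : Nat) => appendAt bs dl ((grid.getD dc []).getD dl 0)) bs) i1,
     L.foldl (fun bs (dc : Nat) => (List.range lmax).foldl
        (fun bs (dl : Nat) => appendAt bs (((dl : Int) - (dc : Int) + (cmax : Int) - 1).toNat)
          ((grid.getD dc []).getD dl 0)) bs) i2,
     L.foldl (fun bs (dc : Nat) => (List.range lmax).foldl
        (fun bs (dl : Nat) => appendAt bs (dc + dl) ((grid.getD dc []).getD dl 0)) bs) i3) := by
  induction L with
  | nil => intro i1 i2 i3; rfl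
  | cons a L ih =>
    intro i1 i2 i3
    rw [List.foldl_cons, List.foldl_cons, List.foldl_cons, List.foldl_cons,
      foldl_prod3 (List.range lmax)
        (fun bs (dl : Nat) => appendAt bs dl ((grid.getD a []).getD dl 0))
        (fun bs (dl : Nat) => appendAt bs (((dl : Int) - (a : Int) + (cmax : Int) - 1).toNat)
          ((grid.getD a []).getD dl 0))
        (fun bs (dl : Nat) => appendAt bs (a + dl) ((grid.getD a []).getD dl 0))
        (i1, i2, i3)]
    exact ih _ _ _

-- ===== VERDICT (by name: the statement is the Claim_ definition above) =====
theorem count_attack_spec : Claim_equal_count_attack := by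
  intro grid n _ hpre
  obtain ⟨hne, _⟩ := hpre
  have hc : 1 ≤ grid.length := by
    cases grid with
    | nil => exact absurd rfl hne
    | cons a l => simp
  show count_attack grid n = count_attack_alt grid n
  simp only [count_attack, count_attack_alt]
  rw [st_split grid grid.length (grid.headD []).length (List.range grid.length)]
  rw [rows_fold_eq grid (grid.headD []).length,
    diags_fold_list_eq grid grid.length (grid.headD []).length,
    adiags_fold_list_eq grid grid.length (grid.headD []).length]
  simp only [foldl_padd, List.map_map, Function.comp_def, List.reverse_reverse]
  have e5 : ∀ l : Nat, walkDec grid (grid.headD []).length ((grid.length : Int) - 1) l =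
      walkDecF grid (grid.headD []).length grid.length l := by
    intro l; unfold walkDec; congr 1; omega
  have e6 : ∀ c : Nat, walkDec grid (grid.headD []).length (c : Int) 0 =
      walkDecF grid (grid.headD []).length (c + 1) 0 := by
    intro c; unfold walkDec; congr 1
  simp only [e5, e6]
  rcases Nat.eq_zero_or_pos (grid.headD []).length with h0 | hl
  · -- lmax = 0: every non-column line is empty and contributes (0,0)
    rw [h0]
    have z1 : psum ((List.range grid.length).map
        (fun x => countAttackList (walkInc grid grid.length 0 x 0) n)) = (0, 0) := by
      refine psum_const_zero _ _ fun x _ => ?_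
      unfold walkInc
      rw [walkIncF_eq]
      simp [countAttackList_nil]
    have z2 : psum ((List.range grid.length).map
        (fun x => countAttackList (walkDecF grid 0 (x + 1) 0) n)) = (0, 0) := by
      refine psum_const_zero _ _ fun x _ => ?_
      rw [walkDecF_eq]
      simp [countAttackList_nil]
    have z3 : psum ((List.range (grid.length + 0 - 1)).map
        (fun k => countAttackList (walkInc grid grid.length 0 (grid.length - 1 - k) (k + 1 - grid.length)) n)) = (0, 0) := by
      refine psum_const_zero _ _ fun k _ => ?_
      unfold walkInc
      rw [walkIncF_eq]
      simp [countAttackList_nil]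
    have z4 : psum ((List.range (grid.length + 0 - 1)).map
        (fun k => countAttackList (walkDecF grid 0 (min grid.length (k + 1)) (k + 1 - grid.length)) n)) = (0, 0) := by
      refine psum_const_zero _ _ fun k _ => ?_
      rw [walkDecF_eq]
      simp [countAttackList_nil]
    simp only [Nat.zero_sub, List.range'_zero, List.range_zero, List.map_nil, z1, z2, z3, z4]
    simp only [padd, psum, List.foldr_nil, List.cons.injEq, and_true]
    constructor <;> omega
  · -- lmax ≥ 1: regroup B's key-indexed sums into A's two edge-indexed sums per family
    rw [keys_split grid.length (grid.headD []).length hc hl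
        (fun k => countAttackList
          (walkInc grid grid.length (grid.headD []).length (grid.length - 1 - k) (k + 1 - grid.length)) n),
      keys_split2 grid.length (grid.headD []).length hc hl
        (fun k => countAttackList
          (walkDecF grid (grid.headD []).length (min grid.length (k + 1)) (k + 1 - grid.length)) n)]
    have t3 : ∀ l ∈ List.range' 1 ((grid.headD []).length - 1),
        countAttackList (walkInc grid grid.length (grid.headD []).length
          (grid.length - 1 - (l + (grid.length - 1))) (l + (grid.length - 1) + 1 - grid.length)) n =
        countAttackList (walkInc grid grid.length (grid.headD []).length 0 l) n := by
      intro l _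
      have e1 : grid.length - 1 - (l + (grid.length - 1)) = 0 := by omega
      have e2 : l + (grid.length - 1) + 1 - grid.length = l := by omega
      rw [e1, e2]
    have t4 : ∀ c ∈ List.range grid.length,
        countAttackList (walkInc grid grid.length (grid.headD []).length
          (grid.length - 1 - (grid.length - 1 - c)) (grid.length - 1 - c + 1 - grid.length)) n =
        countAttackList (walkInc grid grid.length (grid.headD []).length c 0) n := by
      intro c hcm
      simp only [List.mem_range] at hcm
      have e1 : grid.length - 1 - (grid.length - 1 - c) = c := by omega
      have e2 : grid.length - 1 - c + 1 - grid.length = 0 := by omega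
      rw [e1, e2]
    have t5 : ∀ l ∈ List.range' 1 ((grid.headD []).length - 1),
        countAttackList (walkDecF grid (grid.headD []).length
          (min grid.length (l + (grid.length - 1) + 1)) (l + (grid.length - 1) + 1 - grid.length)) n =
        countAttackList (walkDecF grid (grid.headD []).length grid.length l) n := by
      intro l _
      have e1 : min grid.length (l + (grid.length - 1) + 1) = grid.length := by omega
      have e2 : l + (grid.length - 1) + 1 - grid.length = l := by omega
      rw [e1, e2]
    have t6 : ∀ c ∈ List.range grid.length,
        countAttackList (walkDecF grid (grid.headD []).length
          (min grid.length (c + 1)) (c + 1 - grid.length)) n =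
        countAttackList (walkDecF grid (grid.headD []).length (c + 1) 0) n := by
      intro c hcm
      simp only [List.mem_range] at hcm
      have e1 : min grid.length (c + 1) = c + 1 := by omega
      have e2 : c + 1 - grid.length = 0 := by omega
      rw [e1, e2]
    rw [List.map_congr_left t3, List.map_congr_left t4, List.map_congr_left t5,
      List.map_congr_left t6]
    simp only [padd, List.cons.injEq, and_true]
    constructor <;> omega
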